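-- pv_equiv track=rewrite | github.com/pypi-data/pypi-mirror-336 | packages/django-pluralize-ru/django_pluralize_ru-0.1.0.tar.gz/django_pluralize_ru-0.1.0/django_pluralize_ru/templatetags/pluralize_ru.py | pluralize_ru
-- ===== SOURCE A (Python) =====
-- def pluralize_ru(value, forms):
--     """
--     Склонение русских слов после числительных.
--     Формат: "минута,минуты,минут"
--     """
--     try:
--         number = abs(int(value))
--         forms = [f.strip() for f in forms.split(",")]
--
--         if len(forms) != 3:
--             return ""
--
--         if 11 <= number % 100 <= 19:
--             return forms[2]
--
--         last_digit = number % 10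
--         if last_digit == 1:
--             return forms[0]
--         elif 2 <= last_digit <= 4:
--             return forms[1]
--         return forms[2]
--
--     except (ValueError, TypeError):
--         return ""
-- ===== SOURCE B (Python) =====
-- # Branch-free form selection: one precomputed 100-entry table indexed by n % 100
-- # absorbs both the teens override and the last-digit rule.
-- _DIGIT = [2, 0, 1, 1, 1, 2, 2, 2, 2, 2]
-- TABLE = _DIGIT + [2] * 10 + _DIGIT * 8   # rows 0..9 of n % 100; row 1 (11..19 plus 10) is all "many"
--
-- def pluralize_ru(value, forms):
--     try:
--         n = abs(int(value))
--         parts = [f.strip() for f in forms.split(",")]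
--         if len(parts) != 3:
--             return ""
--         return parts[TABLE[n % 100]]
--     except (ValueError, TypeError):
--         return ""
-- ===== Notes on version B (the rewrite author's own statement) =====
-- stated objective: alternative
-- what changed: Replaces A's runtime teens-override check and last-digit if/elif cascade with a single precomputed 100-entry table indexed by n % 100, so form selection is one branch-free lookup.
import Mathlib
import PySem

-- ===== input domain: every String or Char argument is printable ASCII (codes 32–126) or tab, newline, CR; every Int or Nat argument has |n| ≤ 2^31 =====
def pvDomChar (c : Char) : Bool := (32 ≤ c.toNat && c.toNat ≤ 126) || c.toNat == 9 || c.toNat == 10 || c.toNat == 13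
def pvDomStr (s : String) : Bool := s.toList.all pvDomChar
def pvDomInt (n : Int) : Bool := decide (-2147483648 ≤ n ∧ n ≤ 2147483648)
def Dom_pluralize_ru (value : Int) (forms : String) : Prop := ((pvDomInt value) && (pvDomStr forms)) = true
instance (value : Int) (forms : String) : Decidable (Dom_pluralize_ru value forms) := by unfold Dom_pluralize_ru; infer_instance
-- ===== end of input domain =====

-- B replaces A's teens check + last-digit cascade with one precomputed 100-entry table indexed by n % 100 (alternative; same cost).
-- ===== PORT A =====
-- Literal port of A: abs(int(value)); strip each comma-split piece; guard len==3; teens; last-digit cascade.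
def pluralize_ru (value : Int) (forms : String) : String :=
  let number : Int := |value|
  let fs := ((PySem.Str.split? forms ",").getD []).map (fun f => PySem.Str.strip f)  -- sep ≠ "": split? is always some
  if fs.length ≠ 3 then ""
  else if 11 ≤ PySem.Int.mod number 100 ∧ PySem.Int.mod number 100 ≤ 19 then
    (PySem.List.pyGet? fs 2).getD ""   -- in range: len = 3
  else
    let last_digit := PySem.Int.mod number 10
    if last_digit = 1 then (PySem.List.pyGet? fs 0).getD ""
    else if 2 ≤ last_digit ∧ last_digit ≤ 4 then (PySem.List.pyGet? fs 1).getD ""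
    else (PySem.List.pyGet? fs 2).getD ""

-- ===== PORT B =====
-- Port of B: TABLE = _DIGIT + [2]*10 + _DIGIT*8, then one lookup parts[TABLE[n % 100]].
def pvDIGIT : List Int := [2, 0, 1, 1, 1, 2, 2, 2, 2, 2]
def pvTABLE : List Int := pvDIGIT ++ List.replicate 10 2 ++ (List.replicate 8 pvDIGIT).flatten

def pluralize_ru_alt (value : Int) (forms : String) : String :=
  let n : Int := |value|
  let parts := ((PySem.Str.split? forms ",").getD []).map (fun f => PySem.Str.strip f)  -- sep ≠ "": split? is always some
  if parts.length ≠ 3 then ""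
  else
    (PySem.List.pyGet? parts ((PySem.List.pyGet? pvTABLE (PySem.Int.mod n 100)).getD 0)).getD ""
    -- in range: 0 ≤ n%100 < 100 = TABLE length, and every table entry is 0/1/2 < len(parts)

-- ===== PRECONDITION & SPEC =====
def Spec_pluralize_ru (value : Int) (forms : String) (out : String) : Prop := out = pluralize_ru_alt value forms
instance (value : Int) (forms : String) (out : String) : Decidable (Spec_pluralize_ru value forms out) := by unfold Spec_pluralize_ru; infer_instance

-- ===== CLAIM (what is proved, stated in full; the proofs are below) =====
def Claim_equal_pluralize_ru : Prop := ∀ (value : Int) (forms : String), Dom_pluralize_ru value forms → Spec_pluralize_ru value forms (pluralize_ru value forms)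

-- ===== LEMMAS AND PROOFS =====
-- The 100-entry table agrees with A's cascade at every residue t = n % 100.
set_option maxRecDepth 10000 in
theorem pvTABLE_eq_nat : ∀ m : Nat, m < 100 →
    (PySem.List.pyGet? pvTABLE (m : Int)).getD 0 =
      (if 11 ≤ (m : Int) ∧ (m : Int) ≤ 19 then 2
       else if (m : Int) % 10 = 1 then 0
       else if 2 ≤ (m : Int) % 10 ∧ (m : Int) % 10 ≤ 4 then 1
       else 2) := by decide

theorem pvTABLE_eq (t : Int) (h0 : 0 ≤ t) (h1 : t < 100) :
    (PySem.List.pyGet? pvTABLE t).getD 0 =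
      (if 11 ≤ t ∧ t ≤ 19 then 2
       else if t % 10 = 1 then 0
       else if 2 ≤ t % 10 ∧ t % 10 ≤ 4 then 1
       else 2) := by
  lift t to ℕ using h0
  exact pvTABLE_eq_nat t (by exact_mod_cast h1)

-- ===== VERDICT (by name: the statement is the Claim_ definition above) =====
theorem pluralize_ru_spec : Claim_equal_pluralize_ru := by
  intro value forms _
  unfold Spec_pluralize_ru pluralize_ru pluralize_ru_alt
  have hf100 : Int.fmod |value| 100 = |value| % 100 := by rw [Int.fmod_eq_emod]; norm_num
  have hf10 : Int.fmod |value| 10 = |value| % 10 := by rw [Int.fmod_eq_emod]; norm_num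
  by_cases hlen : (((PySem.Str.split? forms ",").getD []).map (fun f => PySem.Str.strip f)).length = 3
  · have h0 : (0:Int) ≤ |value| % 100 := Int.emod_nonneg _ (by norm_num)
    have h1 : |value| % 100 < 100 := Int.emod_lt_of_pos _ (by norm_num)
    have hmm : |value| % 100 % 10 = |value| % 10 :=
      Int.emod_emod_of_dvd _ (by norm_num)
    have hT := pvTABLE_eq (|value| % 100) h0 h1
    rw [hmm] at hT
    simp only [PySem.Int.mod, hf100, hf10, hlen, if_neg (by simp : ¬ (3:Nat) ≠ 3)]
    rw [hT]
    split_ifs <;> rfl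
  · simp only [PySem.Int.mod, hf100, hf10]
    rw [if_pos hlen, if_pos hlen]
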